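-- pv_equiv track=rewrite | github.com/nkchangliu/puzzles | leetcode/verify_preorder.py | verify_preorder_2
-- ===== SOURCE A (Python) =====
-- def verify_preorder_2(pre_order):
--     s = pre_order.split(",")
--     diff = 0
--     for c in s:
--         diff += 1
--         if diff > 1:
--             return False
--         if c != "#":
--             diff -= 2
--     return diff == 1
-- ===== SOURCE B (Python) =====
-- def verify_preorder_2(pre_order):
--     # Stack-collapse method: push each token; whenever the top of the stack
--     # reads "#","#",non-"#", that subtree is resolved and collapses to "#".
--     stack = []
--     for tok in pre_order.split(","):
--         stack.append(tok)
--         while len(stack) >= 3 and stack[-1] == "#" and stack[-2] == "#" and stack[-3] != "#":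
--             stack.pop(); stack.pop(); stack.pop()
--             stack.append("#")
--     return stack == ["#"]
-- ===== Notes on version B (the rewrite author's own statement) =====
-- stated objective: alternative
-- what changed: Replaces the slot-counter with early return by a token stack that repeatedly collapses a resolved subtree (two null tokens atop a node token) into a single null token, returning whether the final stack holds exactly one null token.
import Mathlib
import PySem

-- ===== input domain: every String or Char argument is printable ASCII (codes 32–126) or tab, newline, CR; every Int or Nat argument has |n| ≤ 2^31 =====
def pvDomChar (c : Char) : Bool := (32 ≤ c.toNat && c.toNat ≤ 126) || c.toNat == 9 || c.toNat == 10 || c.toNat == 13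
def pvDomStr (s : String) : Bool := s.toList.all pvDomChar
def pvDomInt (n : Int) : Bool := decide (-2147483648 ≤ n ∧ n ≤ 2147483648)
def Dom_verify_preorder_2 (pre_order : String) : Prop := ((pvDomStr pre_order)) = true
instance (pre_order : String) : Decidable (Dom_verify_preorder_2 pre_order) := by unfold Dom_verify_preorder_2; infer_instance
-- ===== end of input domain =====

-- B replaces A's slot counter by a stack that collapses resolved subtrees; same boolean, same O(n) cost (objective: alternative).

-- ===== PORT A =====
-- A's for-loop over the tokens carrying diff, with A's early `return False`
def goA : List String → Int → Bool
  | [], diff => decide (diff = 1)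
  | c :: rest, diff =>
      let diff := diff + 1
      if diff > 1 then false
      else goA rest (if c ≠ "#" then diff - 2 else diff)

def verify_preorder_2 (pre_order : String) : Bool :=
  goA ((PySem.Str.split? pre_order ",").getD []) 0

-- ===== PORT B =====
-- the inner `while` loop of Source B: stack held top-first
def collapse : List String → List String
  | a :: b :: x :: rest =>
      if a = "#" ∧ b = "#" ∧ x ≠ "#" then collapse ("#" :: rest)
      else a :: b :: x :: rest
  | s => s
  termination_by s => s.length

-- the `for` loop of Source B
def runB : List String → List String → List String
  | [], st => st
  | t :: rest, st => runB rest (collapse (t :: st))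

def verify_preorder_2_alt (pre_order : String) : Bool :=
  runB ((PySem.Str.split? pre_order ",").getD []) [] == ["#"]

-- ===== PRECONDITION & SPEC =====
def Spec_verify_preorder_2 (pre_order : String) (out : Bool) : Prop := out = verify_preorder_2_alt pre_order
instance (pre_order : String) (out : Bool) : Decidable (Spec_verify_preorder_2 pre_order out) := by unfold Spec_verify_preorder_2; infer_instance

-- ===== CLAIM (what is proved, stated in full; the proofs are below) =====
def Claim_equal_verify_preorder_2 : Prop := ∀ (pre_order : String), Dom_verify_preorder_2 pre_order → Spec_verify_preorder_2 pre_order (verify_preorder_2 pre_order)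

-- ===== LEMMAS AND PROOFS =====

-- token weight: "#" counts +1, a node counts -1 (A's diff is the running weight)
def wt : List String → Int
  | [] => 0
  | t :: rest => (if t = "#" then (1 : Int) else -1) + wt rest

-- "block-shaped" stacks (top-first): a sequence of non-"#" nodes, each
-- optionally capped by one "#"; exactly the live stacks of B
inductive Blk : List String → Prop
  | nil : Blk []
  | one (x : String) (h : x ≠ "#") {s : List String} : Blk s → Blk (x :: s)
  | two (x : String) (h : x ≠ "#") {s : List String} : Blk s → Blk ("#" :: x :: s)

theorem blk_wt_nonpos {s : List String} (h : Blk s) : wt s ≤ 0 := by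
  induction h with
  | nil => simp [wt]
  | one x hx _ ih => simp [wt, hx]; omega
  | two x hx _ ih => simp [wt, hx]; omega

theorem collapse_snd_not_hash (a x : String) (hx : x ≠ "#") (s : List String) :
    collapse (a :: x :: s) = a :: x :: s := by
  cases s with
  | nil => simp [collapse]
  | cons y r => simp [collapse, hx]

theorem collapse_not_hash {a : String} (h : a ≠ "#") (s : List String) :
    collapse (a :: s) = a :: s := by
  match s with
  | [] => simp [collapse]
  | [b] => simp [collapse]
  | b :: x :: rest => simp [collapse, h]

-- pushing "#" on a block-shaped stack
theorem collapse_hash_blk {s : List String} (h : Blk s) :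
    (Blk (collapse ("#" :: s)) ∧ wt (collapse ("#" :: s)) = wt s + 1) ∨
    (collapse ("#" :: s) = ["#"] ∧ wt s = 0) := by
  induction h with
  | nil => right; simp [collapse, wt]
  | one x hx hs _ =>
      left
      rw [collapse_snd_not_hash "#" x hx]
      exact ⟨Blk.two x hx hs, by simp [wt]; ring⟩
  | two x hx hs ih =>
      rename_i s'
      have hstep : collapse ("#" :: "#" :: x :: s') = collapse ("#" :: s') := by
        simp [collapse, hx]
      rw [hstep]
      have hwt : wt ("#" :: x :: s') = wt s' := by simp [wt, hx]
      rcases ih with ⟨h1, h2⟩ | ⟨h1, h2⟩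
      · left; exact ⟨h1, by rw [h2, hwt]⟩
      · right; exact ⟨h1, by rw [hwt, h2]⟩

-- dead stacks: bottom element "#" and length ≥ 2; collapse keeps them dead
theorem collapse_dead : ∀ (s : List String), s.getLast? = some "#" → 2 ≤ s.length →
    (collapse s).getLast? = some "#" ∧ 2 ≤ (collapse s).length := by
  intro s
  fun_induction collapse s with
  | case1 a b x rest hcond ih =>
      intro hlast hlen
      obtain ⟨ha, hb, hx⟩ := hcond
      cases rest with
      | nil => simp [List.getLast?] at hlast; exact absurd hlast hx
      | cons y r =>
          have h1 : ("#" :: y :: r).getLast? = some "#" := by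
            simpa [List.getLast?_cons_cons] using hlast
          exact ih h1 (by simp)
  | case2 => intro h1 h2; exact ⟨h1, h2⟩
  | case3 => intro h1 h2; exact ⟨h1, h2⟩

theorem runB_dead : ∀ (toks st : List String), st.getLast? = some "#" → 2 ≤ st.length →
    (runB toks st).getLast? = some "#" ∧ 2 ≤ (runB toks st).length := by
  intro toks
  induction toks with
  | nil => intro st h1 h2; exact ⟨h1, h2⟩
  | cons t rest ih =>
      intro st h1 h2
      have hlast : (t :: st).getLast? = some "#" := by
        cases st with
        | nil => simp at h2
        | cons a s => simpa [List.getLast?_cons_cons] using h1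
      have hc := collapse_dead (t :: st) hlast (by simp; omega)
      exact ih _ hc.1 hc.2

theorem runB_dead_ne (toks st : List String) (h1 : st.getLast? = some "#")
    (h2 : 2 ≤ st.length) : (runB toks st == ["#"]) = false := by
  have h := runB_dead toks st h1 h2
  simp only [beq_eq_false_iff_ne, ne_eq]
  intro heq
  rw [heq] at h
  simp at h

theorem main_lemma : ∀ (toks st : List String) (d : Int),
    ((Blk st ∧ wt st = d) ∨ (st = ["#"] ∧ d = 1)) →
    goA toks d = (runB toks st == ["#"]) := by
  intro toks
  induction toks with
  | nil =>
      intro st d hinv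
      rcases hinv with ⟨hb, hw⟩ | ⟨hst, hd⟩
      · have hle : d ≤ 0 := hw ▸ blk_wt_nonpos hb
        have hne : st ≠ ["#"] := by
          intro h; rw [h] at hw; simp [wt] at hw; omega
        simp only [goA, runB]
        rw [beq_eq_false_iff_ne.mpr hne, decide_eq_false_iff_not]
        omega
      · subst hst hd; simp [goA, runB]
  | cons c rest ih =>
      intro st d hinv
      have hgA : goA (c :: rest) d
          = if d + 1 > 1 then false else goA rest (if c ≠ "#" then d + 1 - 2 else d + 1) := rfl
      have hrB : runB (c :: rest) st = runB rest (collapse (c :: st)) := rfl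
      rw [hgA, hrB]
      rcases hinv with ⟨hb, hw⟩ | ⟨hst, hd⟩
      · have hle : d ≤ 0 := hw ▸ blk_wt_nonpos hb
        rw [if_neg (by omega : ¬ (d + 1 > 1))]
        by_cases hc : c = "#"
        · subst hc
          rw [if_neg (by simp : ¬ ("#" ≠ "#"))]
          rcases collapse_hash_blk hb with ⟨h1, h2⟩ | ⟨h1, h2⟩
          · exact ih _ _ (Or.inl ⟨h1, by rw [h2, hw]⟩)
          · exact ih _ _ (Or.inr ⟨h1, by omega⟩)
        · rw [collapse_not_hash hc st, if_pos hc]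
          exact ih _ _ (Or.inl ⟨Blk.one c hc hb, by simp [wt, hc]; omega⟩)
      · subst hst hd
        have hlast : (c :: ["#"]).getLast? = some "#" := by simp
        have hcoll := collapse_dead (c :: ["#"]) hlast (by simp)
        rw [if_pos (by omega : (1:Int) + 1 > 1)]
        exact (runB_dead_ne rest _ hcoll.1 hcoll.2).symm

-- ===== VERDICT (by name: the statement is the Claim_ definition above) =====
theorem verify_preorder_2_spec : Claim_equal_verify_preorder_2 := by
  intro s _
  unfold Spec_verify_preorder_2 verify_preorder_2 verify_preorder_2_alt
  exact main_lemma _ [] 0 (Or.inl ⟨Blk.nil, rfl⟩)
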